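-- pv_equiv track=rewrite | github.com/jaywongs/Algorithm | oj/upThenDown.py | mindelete
-- ===== SOURCE A (Python) =====
-- def maxlong(li):
--     maxLong = [0 for i in range(len(li))]
--     maxLong[0] = li[0]
--     leng = 1
--
--     for i in range(1, len(li)):
--         if li[i] > maxLong[leng - 1]:
--             maxLong[leng] = li[i]
--             leng += 1
--         else:
--             pos = biSearch(maxLong, leng, li[i])
--             maxLong[pos] = li[i]
--     return leng
--
-- def biSearch(li, length, value):
--     left = 0
--     right = length - 1
--     while left <= right:
--         mid = (right + left) // 2
--         if li[mid] > value:
--             right = mid - 1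
--         elif li[mid] < value:
--             left = mid + 1
--         else:
--             return mid
--     return left
--
-- def mindelete(li):
--     a = [0 for i in range(len(li))]
--     b = [0 for i in range(len(li))]
--     c = 0
--     max = 0
--     min = 0
--     for i in range(len(li)):
--         li_a = li[:i + 1]
--         a[i] = maxlong(li_a)
--
--         li_b = li[:i:-1] + [li[i]]
--         b[i] = maxlong(li_b)
--
--     for i in range(len(li)):
--         if c < a[i] + b[i]:
--             c = a[i] + b[i]
--     return len(li) - c + 1
-- ===== SOURCE B (Python) =====
-- def mindelete(li):
--     # Incremental patience sort: one pass left-to-right and one right-to-left,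
--     # recording the LIS-tails length after every element, instead of re-running
--     # the whole patience computation for each prefix/suffix.
--     def prefix_lis_lengths(seq):
--         tails = []
--         out = []
--         for x in seq:
--             lo, hi = 0, len(tails)
--             while lo < hi:
--                 mid = (lo + hi) // 2
--                 if tails[mid] < x:
--                     lo = mid + 1
--                 else:
--                     hi = mid
--             if lo == len(tails):
--                 tails.append(x)
--             else:
--                 tails[lo] = x
--             out.append(len(tails))
--         return out
--
--     a = prefix_lis_lengths(li)
--     b = prefix_lis_lengths(li[::-1])[::-1]
--     best = 0
--     for u, v in zip(a, b):
--         if best < u + v: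
--             best = u + v
--     return len(li) - best + 1
-- ===== Notes on version B (the rewrite author's own statement) =====
-- stated objective: faster
-- what changed: Instead of re-running the whole patience-sort (maxlong) from scratch for every prefix and every reversed suffix, B runs one incremental patience pass left-to-right and one right-to-left, recording the tails length after each element, and combines the two recorded arrays.
import Mathlib
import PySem

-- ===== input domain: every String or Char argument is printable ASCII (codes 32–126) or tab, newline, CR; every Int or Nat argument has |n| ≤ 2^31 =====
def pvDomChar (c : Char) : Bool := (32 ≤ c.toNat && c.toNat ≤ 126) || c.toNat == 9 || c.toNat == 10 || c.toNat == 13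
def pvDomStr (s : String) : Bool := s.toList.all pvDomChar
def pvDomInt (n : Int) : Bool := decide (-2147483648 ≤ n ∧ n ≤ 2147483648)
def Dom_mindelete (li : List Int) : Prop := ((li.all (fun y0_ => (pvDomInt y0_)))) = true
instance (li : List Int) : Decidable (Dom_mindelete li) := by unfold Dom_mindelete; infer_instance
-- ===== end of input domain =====

-- B replaces A's per-prefix re-runs of patience sort (O(n^2 log n)) by one incremental
-- left-to-right pass and one right-to-left pass recording the tails length after each
-- element (O(n log n)); objective: faster.

-- ===== PORT A =====

-- A's biSearch while-loop: state (left, right); terminates because right - left shrinks.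
-- li[mid] is ported with pyGetD (default 0): every call A makes keeps 0 ≤ left ≤ mid ≤ right < len li,
-- so the index is always in range and the default is never used.
def biSearchGo (li : List Int) (value left right : Int) : Int :=
  if _h : left ≤ right then
    let mid := PySem.Int.floordiv (right + left) 2
    if PySem.List.pyGetD li mid 0 > value then
      biSearchGo li value left (mid - 1)
    else if PySem.List.pyGetD li mid 0 < value then
      biSearchGo li value (mid + 1) right
    else mid
  else left
termination_by (right + 1 - left).toNat
decreasing_by
  all_goals
    rw [show right + left = left + right from Int.add_comm _ _]
    have := PySem.Int.floordiv_two_mid_bounds (lo := left) (hi := right) _h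
    omega

def biSearch (li : List Int) (length value : Int) : Int :=
  biSearchGo li value 0 (length - 1)

-- A's maxlong: maxLong array of zeros, maxLong[0] = li[0] (mindelete only calls it on
-- nonempty lists, so the pyGetD/pySetD defaults are never used), then the index loop.
def maxlong (li : List Int) : Int :=
  let n := PySem.List.len li
  let maxLong0 := (PySem.List.pyRange 0 n 1).map (fun _ => (0 : Int))
  let maxLong1 := PySem.List.pySetD maxLong0 0 (PySem.List.pyGetD li 0 0)
  let st := (PySem.List.pyRange 1 n 1).foldl
    (fun (st : List Int × Int) i =>
      let x := PySem.List.pyGetD li i 0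
      if x > PySem.List.pyGetD st.1 (st.2 - 1) 0 then
        (PySem.List.pySetD st.1 st.2 x, st.2 + 1)
      else
        let pos := biSearch st.1 st.2 x
        (PySem.List.pySetD st.1 pos x, st.2))
    (maxLong1, 1)
  st.2

def mindelete (li : List Int) : Int :=
  let n := PySem.List.len li
  let a0 := (PySem.List.pyRange 0 n 1).map (fun _ => (0 : Int))
  let b0 := (PySem.List.pyRange 0 n 1).map (fun _ => (0 : Int))
  let ab := (PySem.List.pyRange 0 n 1).foldl
    (fun (st : List Int × List Int) i =>
      let li_a := PySem.List.slice li none (some (i + 1))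
      let li_b := (PySem.List.slice? li none (some i) (-1)).getD [] ++ [PySem.List.pyGetD li i 0]
      (PySem.List.pySetD st.1 i (maxlong li_a), PySem.List.pySetD st.2 i (maxlong li_b)))
    (a0, b0)
  let c := (PySem.List.pyRange 0 n 1).foldl
    (fun c i =>
      if c < PySem.List.pyGetD ab.1 i 0 + PySem.List.pyGetD ab.2 i 0 then
        PySem.List.pyGetD ab.1 i 0 + PySem.List.pyGetD ab.2 i 0
      else c)
    0
  n - c + 1

-- ===== PORT B =====

-- B's hand-written bisect_left while-loop (lo, hi shrink towards each other).
def bisectLoop (tails : List Int) (x lo hi : Int) : Int :=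
  if _h : lo < hi then
    let mid := PySem.Int.floordiv (lo + hi) 2
    if PySem.List.pyGetD tails mid 0 < x then
      bisectLoop tails x (mid + 1) hi
    else
      bisectLoop tails x lo mid
  else lo
termination_by (hi - lo).toNat
decreasing_by
  · have h1 : lo * 2 ≤ lo + hi := by omega
    have := (PySem.Int.le_floordiv_iff_mul_le (a := lo + hi) (b := 2) (q := lo) (by omega)).mpr h1
    omega
  · have h1 : lo + hi < hi * 2 := by omega
    have := (PySem.Int.floordiv_lt_iff_lt_mul (a := lo + hi) (b := 2) (q := hi) (by omega)).mpr h1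
    omega

-- one step of B's loop body: insert x into the patience tails
def bstep (tails : List Int) (x : Int) : List Int :=
  let lo := bisectLoop tails x 0 (PySem.List.len tails)
  if lo = PySem.List.len tails then tails ++ [x] else PySem.List.pySetD tails lo x

-- B's prefix_lis_lengths: fold the elements through bstep, recording len(tails) each time
def lensGo (tails : List Int) (xs : List Int) : List Int :=
  match xs with
  | [] => []
  | x :: rest =>
    let t := bstep tails x
    PySem.List.len t :: lensGo t rest

def mindelete_alt (li : List Int) : Int :=
  let a := lensGo [] li
  let b := (lensGo [] li.reverse).reverse   -- li[::-1] is List.reverse (PySem.List.slice?_none_none_neg_one)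
  let best := (a.zip b).foldl
    (fun best uv => if best < uv.1 + uv.2 then uv.1 + uv.2 else best) 0
  PySem.List.len li - best + 1

-- ===== PRECONDITION & SPEC =====
def Spec_mindelete (li : List Int) (out : Int) : Prop := out = mindelete_alt li
instance (li : List Int) (out : Int) : Decidable (Spec_mindelete li out) := by unfold Spec_mindelete; infer_instance

-- ===== CLAIM (what is proved, stated in full; the proofs are below) =====
def Claim_equal_mindelete : Prop := ∀ (li : List Int), Dom_mindelete li → Spec_mindelete li (mindelete li)

-- ===== LEMMAS AND PROOFS =====

-- countP of elements below x
def cP (t : List Int) (x : Int) : Nat := t.countP (fun y => decide (y < x))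

theorem cP_le_length (t : List Int) (x : Int) : cP t x ≤ t.length :=
  List.countP_le_length

-- partition point of a (non-strictly) sorted list
theorem sorted_partition (t : List Int) (x : Int) (hs : t.Pairwise (· ≤ ·))
    (j : Nat) (hj : j < t.length) : t[j] < x ↔ j < cP t x := by
  induction t generalizing j with
  | nil => simp at hj
  | cons y t ih =>
    rcases List.pairwise_cons.mp hs with ⟨hy, ht⟩
    by_cases hyx : y < x
    · have hcp : cP (y :: t) x = cP t x + 1 := by simp [cP, hyx]
      cases j with
      | zero => simpa [hcp] using hyx
      | succ j =>
        simp only [List.getElem_cons_succ, hcp]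
        rw [ih ht j (by simpa using hj)]
        omega
    · have hall : ∀ a ∈ y :: t, ¬ a < x := by
        intro a ha
        rcases List.mem_cons.mp ha with rfl | ha
        · exact hyx
        · have := hy a ha; omega
      have hcp : cP (y :: t) x = 0 := by
        simp only [cP, List.countP_eq_zero]
        intro a ha
        simpa using hall a ha
      rw [hcp]
      constructor
      · intro h; exact absurd h (hall _ (List.getElem_mem hj))
      · omega

theorem bisectLoop_eq_cP (t : List Int) (x : Int) (hs : t.Pairwise (· ≤ ·)) :
    ∀ (lo hi : Int), 0 ≤ lo → lo ≤ hi → hi ≤ (t.length : Int) →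
    (∀ j : Nat, (hj : j < t.length) → (j : Int) < lo → t[j] < x) →
    (∀ j : Nat, (hj : j < t.length) → hi ≤ (j : Int) → ¬ t[j] < x) →
    bisectLoop t x lo hi = (cP t x : Int) := by
  intro lo hi
  induction lo, hi using bisectLoop.induct t x with
  | case1 lo hi hlt m hbr ih =>
    intro h0 _hle hhi hlow hhigh
    have hm : m = PySem.Int.floordiv (lo + hi) 2 := rfl
    have hmid := PySem.Int.floordiv_two_mid_bounds (lo := lo) (hi := hi) (le_of_lt hlt)
    rw [← hm] at hmid
    have hmhi : m < hi := by
      rw [hm]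
      exact (PySem.Int.floordiv_lt_iff_lt_mul (a := lo + hi) (b := 2) (q := hi) (by omega)).mpr (by omega)
    have hget : PySem.List.pyGetD t m 0 = t[m.toNat]'(by omega) :=
      PySem.List.pyGetD_eq_getElem t 0 (by omega) (by omega)
    rw [bisectLoop, dif_pos hlt]
    show (if PySem.List.pyGetD t m 0 < x then bisectLoop t x (m + 1) hi else bisectLoop t x lo m) = _
    rw [if_pos hbr]
    have hbr' : t[m.toNat]'(by omega) < x := hget ▸ hbr
    refine ih (by omega) (by omega) (by omega) ?_ hhigh
    intro j hj hjlt
    have hle : t[j] ≤ t[m.toNat]'(by omega) := by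
      rcases Nat.lt_or_ge j m.toNat with h | h
      · exact List.pairwise_iff_getElem.mp hs j m.toNat hj (by omega) h
      · have : j = m.toNat := by omega
        subst this; exact le_refl _
    omega
  | case2 lo hi hlt m hbr ih =>
    intro h0 _hle hhi hlow hhigh
    have hm : m = PySem.Int.floordiv (lo + hi) 2 := rfl
    have hmid := PySem.Int.floordiv_two_mid_bounds (lo := lo) (hi := hi) (le_of_lt hlt)
    rw [← hm] at hmid
    have hmhi : m < hi := by
      rw [hm]
      exact (PySem.Int.floordiv_lt_iff_lt_mul (a := lo + hi) (b := 2) (q := hi) (by omega)).mpr (by omega)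
    have hget : PySem.List.pyGetD t m 0 = t[m.toNat]'(by omega) :=
      PySem.List.pyGetD_eq_getElem t 0 (by omega) (by omega)
    rw [bisectLoop, dif_pos hlt]
    show (if PySem.List.pyGetD t m 0 < x then bisectLoop t x (m + 1) hi else bisectLoop t x lo m) = _
    rw [if_neg hbr]
    have hbr' : ¬ t[m.toNat]'(by omega) < x := hget ▸ hbr
    refine ih (by omega) (by omega) (by omega) hlow ?_
    intro j hj hjge
    have hmj : t[m.toNat]'(by omega) ≤ t[j] := by
      rcases Nat.lt_or_ge m.toNat j with h | h
      · exact List.pairwise_iff_getElem.mp hs m.toNat j (by omega) hj h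
      · have : j = m.toNat := by omega
        subst this; exact le_refl _
    omega
  | case3 lo hi hnlt =>
    intro h0 hle hhi hlow hhigh
    rw [bisectLoop, dif_neg hnlt]
    have hcle := cP_le_length t x
    have hlo : lo = hi := by omega
    subst hlo
    rcases Nat.lt_trichotomy (cP t x) lo.toNat with h | h | h
    · exfalso
      have hc : cP t x < t.length := by omega
      have := (sorted_partition t x hs (cP t x) hc).mp (hlow _ hc (by omega))
      omega
    · omega
    · exfalso
      have hc : lo.toNat < t.length := by omega
      have := hhigh lo.toNat hc (by omega)
      exact this ((sorted_partition t x hs lo.toNat hc).mpr (by omega))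
theorem bstep_eq (t : List Int) (x : Int) (hs : t.Pairwise (· < ·)) :
    bstep t x = if cP t x = t.length then t ++ [x] else t.set (cP t x) x := by
  have hsle : t.Pairwise (· ≤ ·) := hs.imp (fun h => le_of_lt h)
  have hb : bisectLoop t x 0 (PySem.List.len t) = (cP t x : Int) := by
    rw [PySem.List.len_eq]
    exact bisectLoop_eq_cP t x hsle 0 t.length (le_refl 0) (by positivity)
      (le_refl _) (by intro j hj hjlt; omega) (by intro j hj hjge; omega)
  rw [bstep]
  show (if bisectLoop t x 0 (PySem.List.len t) = PySem.List.len t then t ++ [x]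
        else PySem.List.pySetD t (bisectLoop t x 0 (PySem.List.len t)) x) = _
  rw [hb, PySem.List.len_eq]
  by_cases h : cP t x = t.length
  · rw [if_pos (by exact_mod_cast h), if_pos h]
  · rw [if_neg (by exact_mod_cast h), if_neg h, PySem.List.pySetD_natCast]

theorem bstep_sorted (t : List Int) (x : Int) (hs : t.Pairwise (· < ·)) :
    (bstep t x).Pairwise (· < ·) := by
  have hsle : t.Pairwise (· ≤ ·) := hs.imp (fun h => le_of_lt h)
  rw [bstep_eq t x hs]
  split_ifs with hc
  · refine List.pairwise_append.mpr ⟨hs, List.pairwise_singleton _ _, ?_⟩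
    intro a ha b hb
    rw [List.mem_singleton.mp hb]
    rcases List.getElem_of_mem ha with ⟨j, hj, rfl⟩
    exact (sorted_partition t x hsle j hj).mpr (by omega)
  · have hclt : cP t x < t.length := lt_of_le_of_ne (cP_le_length t x) hc
    rw [List.pairwise_iff_getElem]
    intro i j hi hj hij
    rw [List.length_set] at hi hj
    rw [List.getElem_set, List.getElem_set]
    by_cases hjc : cP t x = j
    · subst hjc
      rw [if_neg (by omega), if_pos rfl]
      exact (sorted_partition t x hsle i hi).mpr (by omega)
    · rw [if_neg hjc]
      by_cases hic : cP t x = i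
      · rw [if_pos hic]
        have hxle : x ≤ t[j] := by
          have := (sorted_partition t x hsle j hj)
          omega
        rcases lt_or_eq_of_le hxle with h | h
        · exact h
        · exfalso
          have h2 : t[cP t x]'(hclt) < t[j] := by
            apply List.pairwise_iff_getElem.mp hs _ _ hclt hj
            omega
          have hnot := (sorted_partition t x hsle (cP t x) hclt)
          omega
      · rw [if_neg hic]
        exact List.pairwise_iff_getElem.mp hs i j hi hj hij

theorem last_lt_iff (t : List Int) (x : Int) (hs : t.Pairwise (· < ·)) (hne : t ≠ []) :
    (t.getLast hne < x ↔ cP t x = t.length) := by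
  have hsle : t.Pairwise (· ≤ ·) := hs.imp (fun h => le_of_lt h)
  have hlen : 0 < t.length := List.length_pos_iff.mpr hne
  rw [List.getLast_eq_getElem]
  constructor
  · intro h
    have hcle := cP_le_length t x
    by_contra hne'
    have hclt : cP t x < t.length := by omega
    have h1 := (sorted_partition t x hsle (cP t x) hclt)
    have h2 : t[cP t x]'(hclt) ≤ t[t.length - 1]'(by omega) := by
      rcases Nat.lt_or_ge (cP t x) (t.length - 1) with hh | hh
      · exact le_of_lt (List.pairwise_iff_getElem.mp hs _ _ hclt (by omega) hh)
      · have he : cP t x = t.length - 1 := by omega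
        simp [he]
    omega
  · intro h
    exact (sorted_partition t x hsle (t.length - 1) (by omega)).mpr (by omega)
theorem biSearchGo_eq_cP (M : List Int) (x : Int) (leng : Nat) (hlen : leng ≤ M.length)
    (hs : (M.take leng).Pairwise (· < ·)) :
    ∀ (left right : Int), 0 ≤ left → left ≤ right + 1 → right < (leng : Int) →
    (∀ j : Nat, (hj : j < leng) → (j : Int) < left → M[j]'(by omega) < x) →
    (∀ j : Nat, (hj : j < leng) → right < (j : Int) → x < M[j]'(by omega)) →
    biSearchGo M x left right = (cP (M.take leng) x : Int) := by
  have htlen : (M.take leng).length = leng := by simp [List.length_take]; omega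
  have hsle : (M.take leng).Pairwise (· ≤ ·) := hs.imp (fun h => le_of_lt h)
  have hmono : ∀ i j : Nat, (hi : i < leng) → (hj : j < leng) → i < j →
      M[i]'(by omega) < M[j]'(by omega) := by
    intro i j hi hj hij
    have := List.pairwise_iff_getElem.mp hs i j (by omega) (by omega) hij
    simpa [List.getElem_take] using this
  have hpart : ∀ j : Nat, (hj : j < leng) → (M[j]'(by omega) < x ↔ j < cP (M.take leng) x) := by
    intro j hj
    have := sorted_partition (M.take leng) x hsle j (by omega)
    simpa [List.getElem_take] using this
  have hcle : cP (M.take leng) x ≤ leng := le_trans (cP_le_length _ _) (le_of_eq htlen)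
  intro left right
  induction left, right using biSearchGo.induct M x with
  | case1 left right hle m hgt ih =>
    intro h0 _h1 hr hlow hhigh
    have hm : m = PySem.Int.floordiv (right + left) 2 := rfl
    have hmid := PySem.Int.floordiv_two_mid_bounds (lo := left) (hi := right) hle
    rw [show left + right = right + left from by omega, ← hm] at hmid
    have hget : PySem.List.pyGetD M m 0 = M[m.toNat]'(by omega) :=
      PySem.List.pyGetD_eq_getElem M 0 (by omega) (by omega)
    rw [biSearchGo, dif_pos hle]
    show (if PySem.List.pyGetD M m 0 > x then biSearchGo M x left (m - 1)
          else if PySem.List.pyGetD M m 0 < x then biSearchGo M x (m + 1) right else m) = _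
    rw [if_pos hgt]
    have hgt' : M[m.toNat]'(by omega) > x := hget ▸ hgt
    refine ih (by omega) (by omega) (by omega) hlow ?_
    intro j hj hjgt
    rcases Nat.lt_or_ge m.toNat j with h | h
    · exact lt_trans hgt' (hmono m.toNat j (by omega) hj h)
    · have : j = m.toNat := by omega
      subst this; exact hgt'
  | case2 left right hle m hngt hlt ih =>
    intro h0 _h1 hr hlow hhigh
    have hm : m = PySem.Int.floordiv (right + left) 2 := rfl
    have hmid := PySem.Int.floordiv_two_mid_bounds (lo := left) (hi := right) hle
    rw [show left + right = right + left from by omega, ← hm] at hmid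
    have hget : PySem.List.pyGetD M m 0 = M[m.toNat]'(by omega) :=
      PySem.List.pyGetD_eq_getElem M 0 (by omega) (by omega)
    rw [biSearchGo, dif_pos hle]
    show (if PySem.List.pyGetD M m 0 > x then biSearchGo M x left (m - 1)
          else if PySem.List.pyGetD M m 0 < x then biSearchGo M x (m + 1) right else m) = _
    rw [if_neg hngt, if_pos hlt]
    have hlt' : M[m.toNat]'(by omega) < x := hget ▸ hlt
    refine ih (by omega) (by omega) (by omega) ?_ hhigh
    intro j hj hjlt
    rcases Nat.lt_or_ge j m.toNat with h | h
    · exact lt_trans (hmono j m.toNat hj (by omega) h) hlt'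
    · have : j = m.toNat := by omega
      subst this; exact hlt'
  | case3 left right hle m hngt hnlt =>
    intro h0 _h1 hr hlow hhigh
    have hm : m = PySem.Int.floordiv (right + left) 2 := rfl
    have hmid := PySem.Int.floordiv_two_mid_bounds (lo := left) (hi := right) hle
    rw [show left + right = right + left from by omega, ← hm] at hmid
    have hget : PySem.List.pyGetD M m 0 = M[m.toNat]'(by omega) :=
      PySem.List.pyGetD_eq_getElem M 0 (by omega) (by omega)
    rw [biSearchGo, dif_pos hle]
    show (if PySem.List.pyGetD M m 0 > x then biSearchGo M x left (m - 1)
          else if PySem.List.pyGetD M m 0 < x then biSearchGo M x (m + 1) right else m) = _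
    rw [if_neg hngt, if_neg hnlt]
    have heq : M[m.toNat]'(by omega) = x := by
      have h1 : ¬ M[m.toNat]'(by omega) > x := hget ▸ hngt
      have h2 : ¬ M[m.toNat]'(by omega) < x := hget ▸ hnlt
      omega
    rcases Nat.lt_trichotomy (cP (M.take leng) x) m.toNat with h | h | h
    · exfalso
      have hc : cP (M.take leng) x < leng := by omega
      have := hmono (cP (M.take leng) x) m.toNat hc (by omega) h
      have := (hpart (cP (M.take leng) x) hc)
      omega
    · omega
    · exfalso
      have := (hpart m.toNat (by omega)).mpr h
      omega
  | case4 left right hnle =>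
    intro h0 h1 hr hlow hhigh
    rw [biSearchGo, dif_neg hnle]
    rcases Nat.lt_trichotomy (cP (M.take leng) x) left.toNat with h | h | h
    · exfalso
      have hc : cP (M.take leng) x < leng := by omega
      have := hlow (cP (M.take leng) x) hc (by omega)
      have := (hpart (cP (M.take leng) x) hc)
      omega
    · omega
    · exfalso
      have hc : left.toNat < leng := by omega
      have h2 := hhigh left.toNat hc (by omega)
      have := (hpart left.toNat hc).mpr (by omega)
      omega
-- the body of A's maxlong loop, as a function of the current element
def stepAfun (st : List Int × Int) (x : Int) : List Int × Int :=
  if x > PySem.List.pyGetD st.1 (st.2 - 1) 0 then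
    (PySem.List.pySetD st.1 st.2 x, st.2 + 1)
  else
    (PySem.List.pySetD st.1 (biSearch st.1 st.2 x) x, st.2)

theorem set_take_succ (M : List Int) (n : Nat) (x : Int) (h : n < M.length) :
    (M.set n x).take (n + 1) = M.take n ++ [x] := by
  apply List.ext_getElem
  · simp [List.length_take]; omega
  · intro i hi1 hi2
    simp only [List.length_take, List.length_set] at hi1
    rw [List.getElem_take, List.getElem_set]
    rcases Nat.lt_or_ge i n with hin | hin
    · rw [if_neg (by omega), List.getElem_append_left (by simp [List.length_take]; omega),
        List.getElem_take]
    · have : i = n := by omega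
      subst this
      rw [if_pos rfl, List.getElem_append_right (by simp [List.length_take])]
      simp [List.length_take]

theorem loopA (rest : List Int) : ∀ (M t : List Int), t.Pairwise (· < ·) → t ≠ [] →
    t.length + rest.length ≤ M.length → M.take t.length = t →
    (rest.foldl stepAfun (M, (t.length : Int))).2 = ((rest.foldl bstep t).length : Int) := by
  induction rest with
  | nil => intro M t _ _ _ _; simp
  | cons x rest ih =>
    intro M t hs hne hlen hMt
    simp only [List.length_cons] at hlen
    have htpos : 0 < t.length := List.length_pos_iff.mpr hne
    have hlast : PySem.List.pyGetD M ((t.length : Int) - 1) 0 = t.getLast hne := by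
      have hg : PySem.List.pyGetD M ((t.length : Int) - 1) 0 = M[((t.length : Int) - 1).toNat]'(by simp; omega) :=
        PySem.List.pyGetD_eq_getElem M 0 (by omega) (by simp; omega)
      rw [hg, List.getLast_eq_getElem]
      have : ((t.length : Int) - 1).toNat = t.length - 1 := by omega
      simp only [this]
      calc M[t.length - 1]'(by omega) = (M.take t.length)[t.length - 1]'(by rw [hMt]; omega) := by
            rw [List.getElem_take]
        _ = t[t.length - 1]'(by omega) := by simp only [hMt]
    simp only [List.foldl_cons]
    by_cases hgt : x > t.getLast hne
    · have hcp : cP t x = t.length := (last_lt_iff t x hs hne).mp hgt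
      have hstep : stepAfun (M, (t.length : Int)) x = (M.set t.length x, (t.length : Int) + 1) := by
        rw [stepAfun]
        simp only [hlast]
        rw [if_pos hgt, PySem.List.pySetD_natCast]
      have hbs : bstep t x = t ++ [x] := by rw [bstep_eq t x hs, if_pos hcp]
      rw [hstep, hbs]
      have h1 : ((t.length : Int) + 1) = ((t ++ [x]).length : Int) := by simp
      rw [h1]
      apply ih
      · exact hbs ▸ bstep_sorted t x hs
      · simp
      · simp only [List.length_append, List.length_singleton, List.length_set]
        omega
      · simp only [List.length_append, List.length_singleton]
        rw [set_take_succ M t.length x (by omega), hMt]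
    · have hcp : cP t x < t.length := by
        have := (last_lt_iff t x hs hne)
        have := cP_le_length t x
        omega
      have hpos : biSearch M (t.length : Int) x = (cP t x : Int) := by
        rw [biSearch]
        have := biSearchGo_eq_cP M x t.length (by omega)
          (by rw [hMt]; exact hs) 0 ((t.length : Int) - 1)
          (le_refl 0) (by omega) (by omega)
          (by intro j hj hjlt; omega)
          (by intro j hj hjgt; omega)
        rw [this, hMt]
      have hstep : stepAfun (M, (t.length : Int)) x = (M.set (cP t x) x, (t.length : Int)) := by
        rw [stepAfun]
        simp only [hlast]
        rw [if_neg (by omega), hpos, PySem.List.pySetD_natCast]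
      have hbs : bstep t x = t.set (cP t x) x := by rw [bstep_eq t x hs, if_neg (by omega)]
      rw [hstep, hbs]
      have h1 : ((t.length : Int)) = (((t.set (cP t x) x).length : Int)) := by simp
      rw [h1]
      apply ih
      · exact hbs ▸ bstep_sorted t x hs
      · simp [← List.length_pos_iff]; omega
      · simp only [List.length_set]
        omega
      · simp only [List.length_set]
        rw [List.take_set, hMt]
theorem bstep_nil (x : Int) : bstep [] x = [x] := by
  rw [bstep, bisectLoop]
  simp [PySem.List.len_eq]

theorem foldl_bstep_nil (x : Int) (rest : List Int) :
    (x :: rest).foldl bstep [] = rest.foldl bstep [x] := by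
  simp [List.foldl_cons, bstep_nil]

theorem maxlong_eq (x : Int) (rest : List Int) :
    maxlong (x :: rest) = (((x :: rest).foldl bstep []).length : Int) := by
  simp only [maxlong]
  rw [show (fun (st : List Int × Int) i =>
        let x := PySem.List.pyGetD (x :: rest) i 0
        if x > PySem.List.pyGetD st.1 (st.2 - 1) 0 then
          (PySem.List.pySetD st.1 st.2 x, st.2 + 1)
        else
          let pos := biSearch st.1 st.2 x
          (PySem.List.pySetD st.1 pos x, st.2)) =
      (fun acc j => stepAfun acc (PySem.List.pyGetD (x :: rest) j 0)) from rfl]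
  rw [PySem.List.foldl_pyRange_pyGetD (x :: rest) (0 : Int) stepAfun _ (a := 1) (by omega)]
  rw [PySem.List.pyGetD_zero_cons, PySem.List.pySetD_of_nonneg _ _ (le_refl (0:Int))]
  have htake : (((PySem.List.pyRange 0 (PySem.List.len (x :: rest)) 1).map
      (fun _ => (0 : Int))).set (0 : Int).toNat x).take 1 = [x] := by
    have := set_take_succ ((PySem.List.pyRange 0 (PySem.List.len (x :: rest)) 1).map
      (fun _ => (0 : Int))) 0 x (by simp)
    simpa using this
  have := loopA rest (((PySem.List.pyRange 0 (PySem.List.len (x :: rest)) 1).map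
      (fun _ => (0 : Int))).set (0 : Int).toNat x) [x]
    (List.pairwise_singleton _ _) (by simp) (by simp [List.length_set]; omega) (by simpa using htake)
  simp only [List.length_singleton, Nat.cast_one] at this
  rw [show (List.drop (Int.toNat 1) (x :: rest)) = rest from rfl, this, foldl_bstep_nil]

theorem lensGo_length (t xs : List Int) : (lensGo t xs).length = xs.length := by
  induction xs generalizing t with
  | nil => simp [lensGo]
  | cons y ys ih => simp [lensGo, ih]

theorem lensGo_getElem (xs : List Int) : ∀ (t : List Int) (j : Nat) (hj : j < xs.length),
    (lensGo t xs)[j]'(by rw [lensGo_length]; exact hj) =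
      (((xs.take (j + 1)).foldl bstep t).length : Int) := by
  induction xs with
  | nil => intro t j hj; simp at hj
  | cons y ys ih =>
    intro t j hj
    cases j with
    | zero => simp [lensGo, PySem.List.len_eq]
    | succ j =>
      simp only [lensGo, List.getElem_cons_succ, List.take_succ_cons, List.foldl_cons]
      exact ih (bstep t y) j (by simpa using hj)
theorem filterMap_getElem_range (xs : List Int) : ∀ c : Nat, c ≤ xs.length →
    List.filterMap (fun k => xs[k]?) (List.range c) = xs.take c := by
  intro c
  induction c with
  | zero => intro _; simp
  | succ c ih =>
    intro hc
    rw [List.range_succ, List.filterMap_append, ih (by omega), List.take_add_one]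
    simp [List.getElem?_eq_getElem (show c < xs.length by omega)]

theorem slice_rev_eq (xs : List Int) (i : Nat) (hi : i < xs.length) :
    PySem.List.slice? xs none (some (i : Int)) (-1) = some ((xs.drop (i + 1)).reverse) := by
  rw [PySem.List.slice?]
  rw [if_neg (by omega)]
  simp only [PySem.List.sliceIndices]
  rw [if_pos (by omega : (-1 : Int) < 0)]
  simp only [if_pos (show (-1 : Int) < 0 by omega), if_neg (show ¬ (i : Int) < 0 by omega)]
  have hmin : min (i : Int) ((xs.length : Int) - 1) = (i : Int) := by omega
  rw [hmin]
  rw [if_neg (by omega : ¬ (0 : Int) < -1)]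
  have hcount : (if (i : Int) < (xs.length : Int) - 1 then
      (((xs.length : Int) - 1 - (i : Int) + - -1 - 1) / -(-1)).toNat else 0) = xs.length - 1 - i := by
    have he : (((xs.length : Int) - 1 - (i : Int) + - -1 - 1) / -(-1)) = (xs.length : Int) - 1 - (i : Int) := by
      norm_num
    split_ifs with h
    · rw [he]; omega
    · omega
  rw [hcount]
  congr 1
  have hc : xs.length - 1 - i ≤ xs.reverse.length := by simp; omega
  calc List.filterMap (fun k : Nat => xs[(((xs.length : Int) - 1) + -1 * (k : Int)).toNat]?)
        (List.range (xs.length - 1 - i))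
      = List.filterMap (fun k : Nat => xs.reverse[k]?) (List.range (xs.length - 1 - i)) := by
        apply List.filterMap_congr
        intro k hk
        rw [List.mem_range] at hk
        rw [List.getElem?_reverse (by omega)]
        congr 1
        omega
    _ = xs.reverse.take (xs.length - 1 - i) := filterMap_getElem_range _ _ hc
    _ = (xs.drop (i + 1)).reverse := by
        rw [List.take_reverse]
        congr 2
        omega
theorem maxlong_eq' (l : List Int) (h : l ≠ []) :
    maxlong l = ((l.foldl bstep []).length : Int) := by
  obtain ⟨y, ys, rfl⟩ := List.exists_cons_of_ne_nil h
  exact maxlong_eq y ys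

-- the two per-index values both programs compute
def Fv (li : List Int) (j : Nat) : Int := (((li.take (j + 1)).foldl bstep []).length : Int)
def Gv (li : List Int) (j : Nat) : Int := ((((li.drop j).reverse).foldl bstep []).length : Int)

def cFold (li : List Int) : Int :=
  (List.range li.length).foldl
    (fun c j => if c < Fv li j + Gv li j then Fv li j + Gv li j else c) 0

-- the body of A's array-building loop
def bodyAB (li : List Int) (st : List Int × List Int) (i : Int) : List Int × List Int :=
  (PySem.List.pySetD st.1 i (maxlong (PySem.List.slice li none (some (i + 1)))),
   PySem.List.pySetD st.2 i
     (maxlong ((PySem.List.slice? li none (some i) (-1)).getD [] ++ [PySem.List.pyGetD li i 0])))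

def mapIf (n k : Nat) (f : Nat → Int) : List Int :=
  (List.range n).map (fun j => if j < k then f j else 0)

theorem set_mapIf (n k : Nat) (f : Nat → Int) (_hk : k < n) :
    (mapIf n k f).set k (f k) = mapIf n (k + 1) f := by
  apply List.ext_getElem
  · simp [mapIf]
  · intro i hi1 hi2
    simp only [mapIf, List.length_set, List.length_map, List.length_range] at hi1 hi2 ⊢
    rw [List.getElem_set]
    simp only [List.getElem_map, List.getElem_range]
    by_cases h1 : k = i
    · subst h1; rw [if_pos rfl, if_pos (by omega)]
    · rw [if_neg h1]
      by_cases h2 : i < k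
      · rw [if_pos h2, if_pos (by omega)]
      · rw [if_neg h2, if_neg (by omega)]

theorem zeros_eq_mapIf (li : List Int) (f : Nat → Int) :
    (PySem.List.pyRange 0 (((li.length : Nat) : Int)) 1).map (fun _ => (0 : Int)) = mapIf li.length 0 f := by
  apply List.ext_getElem
  · simp [mapIf]
  · intro i hi1 hi2
    simp [mapIf]

theorem abFold_eq (li : List Int) : ∀ k : Nat, k ≤ li.length →
    (PySem.List.pyRange 0 (k : Int) 1).foldl (bodyAB li)
      ((PySem.List.pyRange 0 (((li.length : Nat) : Int)) 1).map (fun _ => (0 : Int)),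
       (PySem.List.pyRange 0 (((li.length : Nat) : Int)) 1).map (fun _ => (0 : Int))) =
    (mapIf li.length k (fun j => maxlong (li.take (j + 1))),
     mapIf li.length k (fun j => maxlong ((li.drop j).reverse))) := by
  intro k
  induction k with
  | zero =>
    intro _
    rw [show ((0 : Nat) : Int) = (0 : Int) from rfl, PySem.List.pyRange_one_eq_nil (le_refl (0 : Int))]
    simp only [List.foldl_nil]
    rw [Prod.mk.injEq]
    exact ⟨zeros_eq_mapIf li _, zeros_eq_mapIf li _⟩
  | succ k ih =>
    intro hk
    have hk' : k < li.length := by omega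
    rw [show ((k + 1 : Nat) : Int) = (k : Int) + 1 from by push_cast; ring,
      PySem.List.pyRange_one_succ_right (by omega), List.foldl_append, ih (by omega)]
    simp only [List.foldl_cons, List.foldl_nil, bodyAB]
    rw [Prod.mk.injEq]
    refine ⟨?_, ?_⟩
    · rw [PySem.List.pySetD_natCast,
        show ((k : Int) + 1) = ((k + 1 : Nat) : Int) from by push_cast; ring,
        PySem.List.slice_to_natCast]
      exact set_mapIf _ k _ hk'
    · rw [PySem.List.pySetD_natCast, slice_rev_eq li k hk']
      simp only [Option.getD_some]
      have hget : PySem.List.pyGetD li (k : Int) 0 = li[k]'hk' := by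
        rw [PySem.List.pyGetD_natCast, List.getD_eq_getElem _ _ hk']
      rw [hget]
      have harg : (li.drop (k + 1)).reverse ++ [li[k]'hk'] = (li.drop k).reverse := by
        rw [List.drop_eq_getElem_cons hk', List.reverse_cons]
      rw [harg]
      exact set_mapIf _ k _ hk'
theorem take_ne_nil (li : List Int) (j : Nat) (hj : j < li.length) : li.take (j + 1) ≠ [] := by
  have : (li.take (j + 1)).length = min (j + 1) li.length := List.length_take
  intro h
  rw [h] at this
  simp at this
  omega

theorem drop_rev_ne_nil (li : List Int) (j : Nat) (hj : j < li.length) :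
    (li.drop j).reverse ≠ [] := by
  have : ((li.drop j).reverse).length = li.length - j := by simp
  intro h
  rw [h] at this
  simp at this
  omega

theorem mindelete_eq (li : List Int) : mindelete li = (li.length : Int) - cFold li + 1 := by
  simp only [mindelete]
  rw [show (fun (st : List Int × List Int) i =>
        let li_a := PySem.List.slice li none (some (i + 1))
        let li_b := (PySem.List.slice? li none (some i) (-1)).getD [] ++
          [PySem.List.pyGetD li i 0]
        (PySem.List.pySetD st.1 i (maxlong li_a), PySem.List.pySetD st.2 i (maxlong li_b))) =
      bodyAB li from rfl]
  rw [PySem.List.len_eq]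
  rw [abFold_eq li li.length (le_refl _)]
  have hc : (PySem.List.pyRange 0 (li.length : Int) 1).foldl
      (fun c i =>
        if c < PySem.List.pyGetD (mapIf li.length li.length fun j => maxlong (li.take (j + 1))) i 0 +
               PySem.List.pyGetD (mapIf li.length li.length fun j => maxlong ((li.drop j).reverse)) i 0 then
          PySem.List.pyGetD (mapIf li.length li.length fun j => maxlong (li.take (j + 1))) i 0 +
          PySem.List.pyGetD (mapIf li.length li.length fun j => maxlong ((li.drop j).reverse)) i 0
        else c) 0 = cFold li := by
    rw [PySem.List.pyRange_zero_nat li.length, List.foldl_map, cFold]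
    apply PySem.List.foldl_congr_mem
    intro acc j hj
    rw [List.mem_range] at hj
    have h1 : PySem.List.pyGetD (mapIf li.length li.length fun j => maxlong (li.take (j + 1))) (j : Int) 0
        = Fv li j := by
      rw [PySem.List.pyGetD_natCast, mapIf, PySem.List.getD_map_range _ _ _ _ hj, if_pos hj,
        maxlong_eq' _ (take_ne_nil li j hj), Fv]
    have h2 : PySem.List.pyGetD (mapIf li.length li.length fun j => maxlong ((li.drop j).reverse)) (j : Int) 0
        = Gv li j := by
      rw [PySem.List.pyGetD_natCast, mapIf, PySem.List.getD_map_range _ _ _ _ hj, if_pos hj,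
        maxlong_eq' _ (drop_rev_ne_nil li j hj), Gv]
    rw [h1, h2]
  rw [hc]

theorem mindelete_alt_eq (li : List Int) :
    mindelete_alt li = (li.length : Int) - cFold li + 1 := by
  simp only [mindelete_alt]
  have ha : lensGo [] li = (List.range li.length).map (fun j => Fv li j) := by
    apply List.ext_getElem
    · simp [lensGo_length]
    · intro i hi1 hi2
      rw [List.getElem_map, List.getElem_range]
      have hi : i < li.length := by simpa [lensGo_length] using hi1
      rw [Fv]
      exact lensGo_getElem li [] i hi
  have hb : (lensGo [] li.reverse).reverse = (List.range li.length).map (fun j => Gv li j) := by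
    apply List.ext_getElem
    · simp [lensGo_length]
    · intro i hi1 hi2
      have hi : i < li.length := by simpa [lensGo_length] using hi1
      rw [List.getElem_map, List.getElem_range, List.getElem_reverse]
      have hlen : (lensGo [] li.reverse).length = li.length := by simp [lensGo_length]
      simp only [hlen]
      have hidx : li.length - 1 - i < li.reverse.length := by simp; omega
      have hstep := lensGo_getElem li.reverse [] (li.length - 1 - i) hidx
      rw [hstep, Gv]
      have h1 : li.length - 1 - i + 1 = li.length - i := by omega
      rw [h1, List.take_reverse, show li.length - (li.length - i) = i from by omega]
  rw [ha, hb, List.zip_map', List.foldl_map, PySem.List.len_eq]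
  have hbest : (List.range li.length).foldl
      (fun best j => if best < (Fv li j, Gv li j).1 + (Fv li j, Gv li j).2 then
        (Fv li j, Gv li j).1 + (Fv li j, Gv li j).2 else best) 0 = cFold li := by
    rw [cFold]
  rw [hbest]

-- ===== VERDICT (by name: the statement is the Claim_ definition above) =====
theorem mindelete_spec : Claim_equal_mindelete := by
  intro li _hdom
  show mindelete li = mindelete_alt li
  rw [mindelete_eq, mindelete_alt_eq]
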